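-- pv_equiv track=rewrite | github.com/allanlasser/oldcpu.doe | main.py | index_acquisitions
-- ===== SOURCE A (Python) =====
-- def count_by_manufacturer(data):
--     """Counts the total number of computers by manufacturer."""
--     histogram = {}
--     for computer in data:
--         manufacturer = computer.get(u'Manufacturer', u'').title()
--         if manufacturer:
--             if manufacturer in histogram:
--                 histogram[manufacturer] += 1
--             else:
--                 histogram[manufacturer] = 1
--     return histogram
--
-- def index_acquisitions(data):
--     """Indexes the type of acquisition by category and then by manufacturer."""
--     index = {}
--     for computer in data:
--         # For each type of item, we list the computers with that type
--         name = computer.get(u'Official Name')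
--         if name:
--             if name in index:
--                 index[name].append(computer)
--             else:
--                 index[name] = [computer]
--     for name in index:
--         # We use the list of computers as the input for the counting method
--         index[name] = count_by_manufacturer(index[name])
--     return index
-- ===== SOURCE B (Python) =====
-- def index_acquisitions(data):
--     """Indexes the type of acquisition by category and then by manufacturer."""
--     index = {}
--     for computer in data:
--         name = computer.get(u'Official Name')
--         if name:
--             inner = index.setdefault(name, {})
--             manufacturer = computer.get(u'Manufacturer', u'').title()
--             if manufacturer:
--                 inner[manufacturer] = inner.get(manufacturer, 0) + 1
--     return index
-- ===== Notes on version B (the rewrite author's own statement) =====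
-- stated objective: simpler
-- what changed: Replaces the two-pass group-then-count (build name->list-of-computers, then re-walk the index calling count_by_manufacturer on each list) with a single pass that accumulates nested name->manufacturer counts directly, building no intermediate lists and no helper function.
import Mathlib
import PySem

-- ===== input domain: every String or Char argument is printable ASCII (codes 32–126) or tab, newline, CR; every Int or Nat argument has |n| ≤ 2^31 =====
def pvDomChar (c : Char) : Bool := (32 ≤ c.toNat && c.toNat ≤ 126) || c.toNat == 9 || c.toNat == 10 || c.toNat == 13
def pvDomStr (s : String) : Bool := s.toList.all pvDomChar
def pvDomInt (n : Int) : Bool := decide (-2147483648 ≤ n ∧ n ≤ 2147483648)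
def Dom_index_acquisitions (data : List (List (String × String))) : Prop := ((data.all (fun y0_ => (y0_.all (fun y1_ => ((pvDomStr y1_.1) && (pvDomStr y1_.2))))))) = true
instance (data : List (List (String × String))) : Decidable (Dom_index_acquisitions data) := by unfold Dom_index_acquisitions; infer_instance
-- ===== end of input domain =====

-- B fuses A's group-then-count two passes into one nested-dict accumulation (no intermediate per-name lists, no helper function); return values proved equal.


-- ===== PORT A =====
-- str.title(), hand-ported (PySem has no title); exact on the ASCII domain:
-- a letter after a non-letter is uppercased, a letter after a letter is lowercased.
def pyTitleChars : Bool → List Char → List Char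
  | _, [] => []
  | prevAlpha, c :: cs =>
    (if prevAlpha then PySem.Chars.lowerChar c else PySem.Chars.upperChar c) ::
      pyTitleChars (PySem.Chars.isalpha c) cs

def pyTitle (s : String) : String := String.ofList (pyTitleChars false s.toList)

def aCountStep (histogram : PySem.Dict String Int) (computer : List (String × String)) :
    PySem.Dict String Int :=
  let manufacturer := pyTitle ((PySem.Dict.mk computer).getD "Manufacturer" "")
  if manufacturer ≠ "" then
    if histogram.contains manufacturer then
      histogram.insert manufacturer (histogram.getD manufacturer 0 + 1)
    else
      histogram.insert manufacturer 1
  else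
    histogram

def count_by_manufacturer (data : List (List (String × String))) : PySem.Dict String Int :=
  data.foldl aCountStep PySem.Dict.empty

def aGroupStep (index : PySem.Dict String (List (List (String × String))))
    (computer : List (String × String)) :
    PySem.Dict String (List (List (String × String))) :=
  match (PySem.Dict.mk computer).get? "Official Name" with
  | some name =>
    if name ≠ "" then
      if index.contains name then
        index.insert name (index.getD name [] ++ [computer])
      else
        index.insert name [computer]
    else
      index
  | none => index

def index_acquisitions (data : List (List (String × String))) :
    List (String × List (String × Int)) :=
  (data.foldl aGroupStep PySem.Dict.empty).items.map
    (fun p => (p.1, (count_by_manufacturer p.2).items))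

-- ===== PORT B =====
def bStep (index : PySem.Dict String (PySem.Dict String Int))
    (computer : List (String × String)) :
    PySem.Dict String (PySem.Dict String Int) :=
  match (PySem.Dict.mk computer).get? "Official Name" with
  | some name =>
    if name ≠ "" then
      let index := index.setdefault name PySem.Dict.empty
      let manufacturer := pyTitle ((PySem.Dict.mk computer).getD "Manufacturer" "")
      if manufacturer ≠ "" then
        index.modify name PySem.Dict.empty
          (fun inner => inner.insert manufacturer (inner.getD manufacturer 0 + 1))
      else
        index
    else
      index
  | none => index

def index_acquisitions_alt (data : List (List (String × String))) :
    List (String × List (String × Int)) :=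
  (data.foldl bStep PySem.Dict.empty).items.map (fun p => (p.1, p.2.items))

-- ===== PRECONDITION & SPEC =====
def Spec_index_acquisitions (data : List (List (String × String))) (out : List (String × List (String × Int))) : Prop := out = index_acquisitions_alt data
instance (data : List (List (String × String))) (out : List (String × List (String × Int))) : Decidable (Spec_index_acquisitions data out) := by unfold Spec_index_acquisitions; infer_instance

-- ===== CLAIM (what is proved, stated in full; the proofs are below) =====
def Claim_equal_index_acquisitions : Prop := ∀ (data : List (List (String × String))), Dom_index_acquisitions data → Spec_index_acquisitions data (index_acquisitions data)

-- ===== LEMMAS AND PROOFS =====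

-- the value-wise image of a dict: what A's second loop produces from the grouping dict
def pvMapVals {ν ν' : Type} (f : ν → ν') (d : PySem.Dict String ν) :
    PySem.Dict String ν' :=
  PySem.Dict.mk (d.items.map (fun p => (p.1, f p.2)))

lemma modify_eq_insert {ν : Type} (d : PySem.Dict String ν) (k : String) (dflt : ν)
    (f : ν → ν) : d.modify k dflt f = d.insert k (f (d.getD k dflt)) := rfl

lemma get?_pvMapVals {ν ν' : Type} (f : ν → ν') (d : PySem.Dict String ν) (k : String) :
    (pvMapVals f d).get? k = (d.get? k).map f := by
  obtain ⟨l⟩ := d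
  induction l with
  | nil => rfl
  | cons p rest ih =>
    simp only [pvMapVals, List.map_cons] at *
    rw [PySem.Dict.get?_mk_cons, PySem.Dict.get?_mk_cons]
    by_cases h : p.1 == k
    · simp [h]
    · simp only [h, Bool.false_eq_true, if_false, ih]

lemma contains_pvMapVals {ν ν' : Type} (f : ν → ν') (d : PySem.Dict String ν) (k : String) :
    (pvMapVals f d).contains k = d.contains k := by
  rw [PySem.Dict.contains_eq_isSome_get?, PySem.Dict.contains_eq_isSome_get?,
    get?_pvMapVals]
  cases d.get? k <;> rfl

lemma keys_pvMapVals {ν ν' : Type} (f : ν → ν') (d : PySem.Dict String ν) :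
    (pvMapVals f d).keys = d.keys := by
  simp only [pvMapVals, PySem.Dict.keys, List.map_map]
  rfl

lemma pvMapVals_insert {ν ν' : Type} (f : ν → ν') (d : PySem.Dict String ν)
    (k : String) (v : ν) :
    pvMapVals f (d.insert k v) = (pvMapVals f d).insert k (f v) := by
  apply PySem.Dict.ext
  have hL : (pvMapVals f (d.insert k v)).items
      = (d.insert k v).items.map (fun p => (p.1, f p.2)) := rfl
  have hR : (pvMapVals f d).items = d.items.map (fun p => (p.1, f p.2)) := rfl
  rw [hL, PySem.Dict.items_insert, PySem.Dict.items_insert, contains_pvMapVals, hR]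
  split_ifs with h1
  · simp only [List.map_map]
    apply List.map_congr_left
    intro p _
    by_cases h : p.1 == k <;> simp [h, Function.comp]
  · simp

lemma insert_get?_self {ν : Type} (d : PySem.Dict String ν) (k : String) (v : ν)
    (h : d.get? k = some v) (hnd : d.keys.Nodup) : d.insert k v = d := by
  have hc : d.contains k = true := by
    rw [PySem.Dict.contains_eq_isSome_get?, h]; rfl
  apply PySem.Dict.ext
  rw [PySem.Dict.items_insert, if_pos hc]
  conv_rhs => rw [← List.map_id d.items]
  apply List.map_congr_left
  intro p hp
  by_cases hpk : p.1 == k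
  · obtain ⟨p1, p2⟩ := p
    have hk : p1 = k := by simpa using hpk
    have hget : d.get? p1 = some p2 := PySem.Dict.get?_of_mem_items d hp hnd
    rw [hk, h] at hget
    have hv : v = p2 := Option.some_inj.mp hget
    simp [hk, hv]
  · simp [hpk]

lemma aCountStep_eq (h : PySem.Dict String Int) (c : List (String × String)) :
    aCountStep h c =
      if pyTitle ((PySem.Dict.mk c).getD "Manufacturer" "") ≠ "" then
        h.insert (pyTitle ((PySem.Dict.mk c).getD "Manufacturer" ""))
          (h.getD (pyTitle ((PySem.Dict.mk c).getD "Manufacturer" "")) 0 + 1)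
      else h := by
  unfold aCountStep
  by_cases hm : pyTitle ((PySem.Dict.mk c).getD "Manufacturer" "") ≠ ""
  · rw [if_pos hm, if_pos hm]
    by_cases hc : h.contains (pyTitle ((PySem.Dict.mk c).getD "Manufacturer" "")) = true
    · rw [if_pos hc]
    · rw [if_neg hc]
      have hcf : h.contains (pyTitle ((PySem.Dict.mk c).getD "Manufacturer" "")) = false := by
        revert hc
        cases h.contains (pyTitle ((PySem.Dict.mk c).getD "Manufacturer" "")) <;> simp
      have h0 : h.getD (pyTitle ((PySem.Dict.mk c).getD "Manufacturer" "")) 0 = 0 := by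
        simp [pysem, hcf]
      rw [h0]
      norm_num
  · rw [if_neg hm, if_neg hm]

lemma count_append (l : List (List (String × String))) (c : List (String × String)) :
    count_by_manufacturer (l ++ [c]) = aCountStep (count_by_manufacturer l) c := by
  unfold count_by_manufacturer
  rw [List.foldl_append]
  rfl

lemma nodup_aGroupStep (acc : PySem.Dict String (List (List (String × String))))
    (c : List (String × String)) (hnd : acc.keys.Nodup) :
    (aGroupStep acc c).keys.Nodup := by
  unfold aGroupStep
  cases (PySem.Dict.mk c).get? "Official Name" with
  | none => exact hnd
  | some name =>
    simp only []
    by_cases hne : name ≠ ""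
    · rw [if_pos hne]
      by_cases hc : acc.contains name = true
      · rw [if_pos hc]
        apply PySem.Dict.nodup_keys_insert
        exact hnd
      · rw [if_neg hc]
        apply PySem.Dict.nodup_keys_insert
        exact hnd
    · rw [if_neg hne]
      exact hnd

lemma step_eq (acc : PySem.Dict String (List (List (String × String))))
    (c : List (String × String)) (hnd : acc.keys.Nodup) :
    bStep (pvMapVals count_by_manufacturer acc) c
      = pvMapVals count_by_manufacturer (aGroupStep acc c) := by
  unfold bStep aGroupStep
  cases hname : (PySem.Dict.mk c).get? "Official Name" with
  | none => rfl
  | some name =>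
    simp only []
    by_cases hne : name ≠ ""
    case neg => simp [hne]
    rw [if_pos hne, if_pos hne]
    by_cases hc : acc.contains name = true
    · -- name already grouped
      obtain ⟨l, hl⟩ : ∃ l, acc.get? name = some l := by
        have h2 := hc
        rw [PySem.Dict.contains_eq_isSome_get?] at h2
        exact Option.isSome_iff_exists.mp h2
      have hsd : (pvMapVals count_by_manufacturer acc).setdefault name PySem.Dict.empty
          = pvMapVals count_by_manufacturer acc := by
        apply PySem.Dict.setdefault_of_contains
        rw [contains_pvMapVals]
        exact hc
      have hgd : acc.getD name [] = l := by
        rw [PySem.Dict.getD_eq_get?_getD, hl]; rfl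
      have hgd2 : (pvMapVals count_by_manufacturer acc).getD name PySem.Dict.empty
          = count_by_manufacturer l := by
        rw [PySem.Dict.getD_eq_get?_getD, get?_pvMapVals, hl]; rfl
      rw [if_pos hc, hsd, hgd]
      by_cases hm : pyTitle ((PySem.Dict.mk c).getD "Manufacturer" "") ≠ ""
      · rw [if_pos hm, modify_eq_insert, hgd2, pvMapVals_insert, count_append,
          aCountStep_eq, if_pos hm]
      · rw [if_neg hm, pvMapVals_insert, count_append, aCountStep_eq, if_neg hm]
        exact (insert_get?_self _ name (count_by_manufacturer l)
          (by rw [get?_pvMapVals, hl]; rfl)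
          (by rw [keys_pvMapVals]; exact hnd)).symm
    · -- fresh name
      have hsd : (pvMapVals count_by_manufacturer acc).setdefault name PySem.Dict.empty
          = (pvMapVals count_by_manufacturer acc).insert name PySem.Dict.empty := by
        apply PySem.Dict.setdefault_of_not_contains
        rw [contains_pvMapVals]
        revert hc
        cases acc.contains name <;> simp
      have hcount : count_by_manufacturer [c] = aCountStep PySem.Dict.empty c := rfl
      rw [if_neg hc, hsd]
      by_cases hm : pyTitle ((PySem.Dict.mk c).getD "Manufacturer" "") ≠ ""
      · rw [if_pos hm, modify_eq_insert, PySem.Dict.getD_insert_self,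
          PySem.Dict.insert_insert_self, pvMapVals_insert, hcount, aCountStep_eq,
          if_pos hm]
      · rw [if_neg hm, pvMapVals_insert, hcount, aCountStep_eq, if_neg hm]

lemma fold_eq (data : List (List (String × String)))
    (acc : PySem.Dict String (List (List (String × String)))) (hnd : acc.keys.Nodup) :
    data.foldl bStep (pvMapVals count_by_manufacturer acc)
      = pvMapVals count_by_manufacturer (data.foldl aGroupStep acc) := by
  induction data generalizing acc with
  | nil => rfl
  | cons c rest ih =>
    rw [List.foldl_cons, List.foldl_cons, step_eq acc c hnd]
    exact ih _ (nodup_aGroupStep acc c hnd)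

lemma main_eq (data : List (List (String × String))) :
    index_acquisitions data = index_acquisitions_alt data := by
  unfold index_acquisitions index_acquisitions_alt
  have hempty : (PySem.Dict.empty : PySem.Dict String (PySem.Dict String Int))
      = pvMapVals count_by_manufacturer (PySem.Dict.empty) := rfl
  rw [hempty, fold_eq data PySem.Dict.empty (by simp)]
  simp [pvMapVals, List.map_map, Function.comp]

-- ===== VERDICT (by name: the statement is the Claim_ definition above) =====
theorem index_acquisitions_spec : Claim_equal_index_acquisitions := by
  intro data _
  unfold Spec_index_acquisitions
  exact main_eq data
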